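-- pv_equiv track=rewrite | github.com/applepie321/Coding_Tests | python/codewars/bookseller.py | stock_list
-- ===== SOURCE A (Python) =====
-- def stock_list(list_of_art, list_of_cat):
--     if not list_of_art or not list_of_cat:
--         return ""
--     stock = {cat: 0 for cat in list_of_cat}
--     for art in list_of_art:
--         cat = art[0]
--         if cat in stock:
--             stock[cat] += int(art.split()[1])
--     return " - ".join(f"({cat} : {stock[cat]})" for cat in list_of_cat)
-- ===== SOURCE B (Python) =====
-- def stock_list(list_of_art, list_of_cat):
--     if not list_of_art or not list_of_cat:
--         return ""
--     return " - ".join(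
--         f"({cat} : {sum(int(art.split()[1]) for art in list_of_art if art[0] == cat)})"
--         for cat in list_of_cat
--     )
-- ===== Notes on version B (the rewrite author's own statement) =====
-- stated objective: idiomatic
-- what changed: Drops the accumulator dict and the single indexed pass: the report is built directly by joining over the category list, computing each category's total with an inline per-category sum over the article list.
import Mathlib
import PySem

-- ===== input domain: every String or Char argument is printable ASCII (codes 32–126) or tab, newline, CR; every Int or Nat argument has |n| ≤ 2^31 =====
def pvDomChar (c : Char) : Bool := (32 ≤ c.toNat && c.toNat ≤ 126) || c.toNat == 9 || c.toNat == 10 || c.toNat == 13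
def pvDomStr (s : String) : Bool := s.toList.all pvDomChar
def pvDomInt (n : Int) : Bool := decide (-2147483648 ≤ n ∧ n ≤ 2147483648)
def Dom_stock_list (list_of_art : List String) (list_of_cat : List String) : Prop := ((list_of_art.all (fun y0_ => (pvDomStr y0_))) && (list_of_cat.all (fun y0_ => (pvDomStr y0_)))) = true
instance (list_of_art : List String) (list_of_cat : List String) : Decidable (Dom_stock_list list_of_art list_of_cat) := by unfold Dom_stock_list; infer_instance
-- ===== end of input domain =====

-- B drops the accumulator dict: it joins over the categories, computing each total by an
-- inline per-category sum over the articles (idiomatic; not faster). Equivalence on the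
-- inputs where the Python A returns (Pre_ below excludes exactly its exceptions).

-- ===== PORT A =====
-- int(art.split()[1]) of A, defaulted ONLY where Python raises (those inputs are outside Pre_)
def pvVal (art : String) : Int :=
  (PySem.Int.ofStr? ((PySem.Str.split₀ art).getD 1 "")).getD 0

def pvStepA (d : PySem.Dict String Int) (art : String) : PySem.Dict String Int :=
  match PySem.Str.pyGet? art 0 with
  | none => d            -- art[0] raises IndexError in Python: outside Pre_
  | some c =>
    let cat := String.mk [c]
    if d.contains cat then d.modify cat 0 (· + pvVal art) else d

def stock_list (list_of_art : List String) (list_of_cat : List String) : String :=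
  if list_of_art.isEmpty || list_of_cat.isEmpty then "" else
  let stock := list_of_cat.foldl (fun d cat => d.insert cat (0 : Int)) PySem.Dict.empty
  let stock := list_of_art.foldl pvStepA stock
  PySem.Str.join " - "
    (list_of_cat.map (fun cat => "(" ++ cat ++ " : " ++ PySem.Int.toStr (stock.getD cat 0) ++ ")"))

-- ===== PORT B =====
-- art[0] == cat (Python compares the 1-char string)
def pvMatch (art : String) (cat : String) : Bool :=
  match PySem.Str.pyGet? art 0 with
  | none => false        -- art[0] raises in Python: outside Pre_
  | some c => String.mk [c] == cat

def stock_list_alt (list_of_art : List String) (list_of_cat : List String) : String :=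
  if list_of_art.isEmpty || list_of_cat.isEmpty then "" else
  PySem.Str.join " - "
    (list_of_cat.map (fun cat =>
      "(" ++ cat ++ " : " ++
        PySem.Int.toStr
          (list_of_art.foldl (fun acc art => if pvMatch art cat then acc + pvVal art else acc) 0)
        ++ ")"))

-- ===== PRECONDITION & SPEC =====
-- per-article condition: art is nonempty, and if its first character names a listed
-- category then art.split() has a second token and that token parses as a Python int
def pvPreArt (art : String) (cats : List String) : Bool :=
  match art.toList with
  | [] => false
  | c :: _ =>
    !(cats.contains (String.mk [c])) ||
      (decide (2 ≤ (PySem.Str.split₀ art).length) &&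
        (PySem.Int.ofStr? ((PySem.Str.split₀ art).getD 1 "")).isSome)

-- Pre_ excludes exactly the inputs on which Python A raises: when both lists are nonempty,
-- an empty article string (IndexError on art[0]), or an article of a listed category whose
-- split lacks a second token (IndexError) or whose second token is not an int (ValueError).
def Pre_stock_list (list_of_art : List String) (list_of_cat : List String) : Prop :=
  list_of_art = [] ∨ list_of_cat = [] ∨
    ∀ art ∈ list_of_art, pvPreArt art list_of_cat = true

instance (list_of_art : List String) (list_of_cat : List String) : Decidable (Pre_stock_list list_of_art list_of_cat) := by
  unfold Pre_stock_list; infer_instance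

def pvWitness_stock_list : List String × List String := (["A 5", "B 2", "Z 9"], ["A", "B"])

def Spec_stock_list (list_of_art : List String) (list_of_cat : List String) (out : String) : Prop := out = stock_list_alt list_of_art list_of_cat
instance (list_of_art : List String) (list_of_cat : List String) (out : String) : Decidable (Spec_stock_list list_of_art list_of_cat out) := by unfold Spec_stock_list; infer_instance

-- ===== CLAIM (what is proved, stated in full; the proofs are below) =====
def Claim_equal_stock_list : Prop := ∀ (list_of_art : List String) (list_of_cat : List String), Dom_stock_list list_of_art list_of_cat → Pre_stock_list list_of_art list_of_cat → Spec_stock_list list_of_art list_of_cat (stock_list list_of_art list_of_cat)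

-- ===== LEMMAS AND PROOFS =====

-- B's per-category sum
def pvSum (arts : List String) (cat : String) : Int :=
  arts.foldl (fun acc art => if pvMatch art cat then acc + pvVal art else acc) 0

theorem pvSum_shift (arts : List String) (cat : String) (acc : Int) :
    arts.foldl (fun a art => if pvMatch art cat then a + pvVal art else a) acc
      = acc + pvSum arts cat := by
  induction arts generalizing acc with
  | nil => simp [pvSum]
  | cons a l ih =>
    simp only [pvSum, List.foldl_cons]
    rw [ih, ih]
    split <;> ring

theorem pvStepA_contains (d : PySem.Dict String Int) (art k : String) :
    (pvStepA d art).contains k = d.contains k := by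
  unfold pvStepA
  cases PySem.Str.pyGet? art 0 with
  | none => rfl
  | some c =>
    simp only
    split
    · rename_i h
      rw [PySem.Dict.contains_modify]
      by_cases hk : k = String.mk [c]
      · simp [hk, h]
      · simp [hk]
    · rfl

theorem pvStepA_getD (d : PySem.Dict String Int) (art cat : String)
    (hc : d.contains cat = true) :
    (pvStepA d art).getD cat 0
      = d.getD cat 0 + (if pvMatch art cat then pvVal art else 0) := by
  unfold pvStepA pvMatch
  cases PySem.Str.pyGet? art 0 with
  | none => simp
  | some c =>
    simp only
    by_cases hm : String.mk [c] = cat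
    · subst hm
      simp only [hc, if_true, beq_self_eq_true]
      rw [PySem.Dict.getD_modify]
      simp
    · have hb : (String.mk [c] == cat) = false := by simp [hm]
      simp only [hb]
      split
      · rw [PySem.Dict.getD_modify]
        simp [Ne.symm hm]
      · simp

theorem pvFoldA_getD (arts : List String) (d : PySem.Dict String Int) (cat : String)
    (hc : d.contains cat = true) :
    (arts.foldl pvStepA d).getD cat 0 = d.getD cat 0 + pvSum arts cat := by
  induction arts generalizing d with
  | nil => simp [pvSum]
  | cons a l ih =>
    rw [List.foldl_cons, ih _ (by rw [pvStepA_contains]; exact hc),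
        pvStepA_getD d a cat hc]
    simp only [pvSum, List.foldl_cons]
    rw [pvSum_shift l cat (if pvMatch a cat = true then 0 + pvVal a else 0)]
    split <;> simp only [pvSum] <;> ring

theorem pvInit_contains (cats : List String) (d : PySem.Dict String Int) (k : String)
    (hk : k ∈ cats) :
    (cats.foldl (fun d cat => d.insert cat 0) d).contains k = true := by
  induction cats generalizing d with
  | nil => cases hk
  | cons c l ih =>
    rw [List.foldl_cons]
    rcases List.mem_cons.mp hk with h | h
    · subst h
      have : ∀ (l : List String) (d : PySem.Dict String Int),
          d.contains k = true → (l.foldl (fun d cat => d.insert cat 0) d).contains k = true := by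
        intro l
        induction l with
        | nil => intro d h; exact h
        | cons c' l' ih' =>
          intro d h
          rw [List.foldl_cons]
          exact ih' _ (by rw [PySem.Dict.contains_insert, h, Bool.or_true])
      exact this l _ (PySem.Dict.contains_insert_self _ _ _)
    · exact ih _ h

theorem pvInit_getD (cats : List String) (d : PySem.Dict String Int) (k : String)
    (hk : k ∈ cats) :
    (cats.foldl (fun d cat => d.insert cat 0) d).getD k 0 = 0 := by
  induction cats generalizing d with
  | nil => cases hk
  | cons c l ih =>
    rw [List.foldl_cons]
    by_cases h : k ∈ l
    · exact ih _ h
    · have hck : k = c := by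
        rcases List.mem_cons.mp hk with h' | h'
        · exact h'
        · exact absurd h' h
      subst hck
      have : ∀ (l : List String) (d : PySem.Dict String Int),
          k ∉ l → d.getD k 0 = 0 → (l.foldl (fun d cat => d.insert cat 0) d).getD k 0 = 0 := by
        intro l
        induction l with
        | nil => intro d _ h0; exact h0
        | cons c' l' ih' =>
          intro d hnm h0
          rw [List.foldl_cons]
          refine ih' _ (fun hm => hnm (List.mem_cons_of_mem _ hm)) ?_
          rw [PySem.Dict.getD_insert]
          have : k ≠ c' := fun he => hnm (he ▸ List.mem_cons_self)
          simp [this, h0]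
      exact this l _ h (by rw [PySem.Dict.getD_insert]; simp)

-- ===== VERDICT (by name: the statement is the Claim_ definition above) =====
theorem stock_list_spec : Claim_equal_stock_list := by
  intro arts cats _ _
  unfold Spec_stock_list stock_list stock_list_alt
  by_cases hg : arts.isEmpty || cats.isEmpty
  · simp [hg]
  · simp only [hg]
    refine congrArg (PySem.Str.join " - ") (List.map_congr_left ?_)
    intro cat hcat
    have hc : ((cats.foldl (fun d cat => d.insert cat (0 : Int)) PySem.Dict.empty).contains cat) = true :=
      pvInit_contains cats _ cat hcat
    rw [pvFoldA_getD _ _ _ hc, pvInit_getD cats _ cat hcat, zero_add]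
    rfl
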